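-- pv_equiv track=rewrite | github.com/LucasVianaa/Compilador-Pinguim | gera_reconhecedor.py | find_next_non_terminal
-- ===== SOURCE A (Python) =====
-- def find_next_non_terminal(text):
--     result = ""
--     for x in text:
--         if x == '>':
--             break
--         elif x != '<':
--             result += x
--     return result
-- ===== SOURCE B (Python) =====
-- def find_next_non_terminal(text):
--     return text.split('>', 1)[0].replace('<', '')
-- ===== Notes on version B (the rewrite author's own statement) =====
-- stated objective: simpler
-- what changed: Replaced the fused per-character loop (break on '>', skip '<', accumulate by string concatenation) by two separate passes: take the prefix before the first '>' via split('>',1)[0], then delete '<' via replace.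
import Mathlib
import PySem

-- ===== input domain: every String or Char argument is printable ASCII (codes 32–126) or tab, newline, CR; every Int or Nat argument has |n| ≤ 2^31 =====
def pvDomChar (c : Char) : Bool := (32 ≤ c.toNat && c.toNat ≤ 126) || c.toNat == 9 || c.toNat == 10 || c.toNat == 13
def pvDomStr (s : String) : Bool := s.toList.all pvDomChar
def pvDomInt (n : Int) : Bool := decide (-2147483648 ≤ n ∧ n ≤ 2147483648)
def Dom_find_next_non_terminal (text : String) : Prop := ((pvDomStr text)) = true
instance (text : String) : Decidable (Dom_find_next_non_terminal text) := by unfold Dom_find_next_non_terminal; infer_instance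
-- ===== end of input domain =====

-- B replaces A's fused per-character loop (break on '>', skip '<', accumulate) by two
-- separate passes: take the prefix before the first '>' with split('>',1)[0], then delete
-- every '<' with replace — simpler (objective: simpler; no speed claim).


-- ===== PORT A =====
-- the for-loop: accumulator `result`, break on '>', skip '<', else append
def pvLoopA : List Char → List Char → List Char
  | acc, [] => acc
  | acc, x :: xs =>
    if x = '>' then acc
    else if x ≠ '<' then pvLoopA (acc ++ [x]) xs
    else pvLoopA acc xs

def find_next_non_terminal (text : String) : String :=
  String.ofList (pvLoopA [] text.toList)

-- ===== PORT B =====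
-- text.split('>', 1)[0].replace('<', '')  (split with sep ">" never raises and always
-- returns a non-empty list, so getD/headD defaults are unreachable totality guards)
def find_next_non_terminal_alt (text : String) : String :=
  let parts := (PySem.Str.splitMax? text ">" 1).getD []
  PySem.Str.replace (parts.headD "") "<" ""

-- ===== PRECONDITION & SPEC =====
def Spec_find_next_non_terminal (text : String) (out : String) : Prop := out = find_next_non_terminal_alt text
instance (text : String) (out : String) : Decidable (Spec_find_next_non_terminal text out) := by unfold Spec_find_next_non_terminal; infer_instance

-- ===== CLAIM (what is proved, stated in full; the proofs are below) =====
def Claim_equal_find_next_non_terminal : Prop := ∀ (text : String), Dom_find_next_non_terminal text → Spec_find_next_non_terminal text (find_next_non_terminal text)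

-- ===== LEMMAS AND PROOFS =====

-- A's loop yields the '<'-filtered prefix before the first '>'
theorem pvLoopA_eq (l acc : List Char) :
    pvLoopA acc l = acc ++ (l.takeWhile (· ≠ '>')).filter (· ≠ '<') := by
  induction l generalizing acc with
  | nil => simp [pvLoopA]
  | cons x xs ih =>
    by_cases hgt : x = '>'
    · simp [pvLoopA, hgt]
    · by_cases hlt : x = '<'
      · simp [pvLoopA, hlt, ih, List.takeWhile]
      · simp [pvLoopA, hgt, hlt, ih, List.takeWhile]

-- replace.go with old = ['<'], new = [] filters out '<'
theorem pvReplaceGo_eq (l acc : List Char) (fuel : Nat) (h : l.length ≤ fuel) :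
    PySem.Chars.replace.go ['<'] [] fuel l acc = acc.reverse ++ l.filter (· ≠ '<') := by
  induction l generalizing acc fuel with
  | nil => cases fuel <;> simp [PySem.Chars.replace.go]
  | cons c t ih =>
    cases fuel with
    | zero => simp at h
    | succ f =>
      simp only [List.length_cons, Nat.succ_le_succ_iff] at h
      by_cases hc : c = '<'
      · have hpre : List.isPrefixOf ['<'] (c :: t) = true := by simp [hc, List.isPrefixOf]
        rw [show PySem.Chars.replace.go ['<'] [] (f + 1) (c :: t) acc
              = PySem.Chars.replace.go ['<'] [] f t acc from by
            simp [PySem.Chars.replace.go, hpre]]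
        rw [ih acc f h]
        simp [hc]
      · have hpre : List.isPrefixOf ['<'] (c :: t) = false := by
          simp [List.isPrefixOf]; exact fun hh => hc hh.symm
        rw [show PySem.Chars.replace.go ['<'] [] (f + 1) (c :: t) acc
              = PySem.Chars.replace.go ['<'] [] f t (c :: acc) from by
            simp [PySem.Chars.replace.go, hpre]]
        rw [ih (c :: acc) f h]
        simp [hc]

-- splitOnMax.go with maxsplit exhausted returns the rest as one piece
theorem pvSplitGo_zero (l cur : List Char) (acc : List (List Char)) (fuel : Nat) :
    PySem.Chars.splitOnMax.go ['>'] fuel 0 l cur acc = acc.reverse ++ [cur.reverse ++ l] := by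
  cases fuel with
  | zero => simp [PySem.Chars.splitOnMax.go]
  | succ f => cases l <;> simp [PySem.Chars.splitOnMax.go]

-- splitOnMax.go with maxsplit = 1: the first piece is the prefix before the first '>'
theorem pvSplitGo_one (l cur : List Char) (acc : List (List Char)) (fuel : Nat) (h : l.length ≤ fuel) :
    ∃ t, PySem.Chars.splitOnMax.go ['>'] fuel 1 l cur acc
      = acc.reverse ++ (cur.reverse ++ l.takeWhile (· ≠ '>')) :: t := by
  induction l generalizing cur fuel with
  | nil =>
    cases fuel with
    | zero => exact ⟨[], by simp [PySem.Chars.splitOnMax.go]⟩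
    | succ f => exact ⟨[], by simp [PySem.Chars.splitOnMax.go]⟩
  | cons c r ih =>
    cases fuel with
    | zero => simp at h
    | succ f =>
      simp only [List.length_cons, Nat.succ_le_succ_iff] at h
      by_cases hc : c = '>'
      · have hpre : List.isPrefixOf ['>'] (c :: r) = true := by simp [hc, List.isPrefixOf]
        refine ⟨[r], ?_⟩
        rw [show PySem.Chars.splitOnMax.go ['>'] (f + 1) 1 (c :: r) cur acc
              = PySem.Chars.splitOnMax.go ['>'] f 0 r [] (cur.reverse :: acc) from by
            simp [PySem.Chars.splitOnMax.go, hpre]]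
        rw [pvSplitGo_zero]
        simp [hc, List.takeWhile]
      · have hpre : List.isPrefixOf ['>'] (c :: r) = false := by
          simp [List.isPrefixOf]; exact fun hh => hc hh.symm
        obtain ⟨t, ht⟩ := ih (c :: cur) f h
        refine ⟨t, ?_⟩
        rw [show PySem.Chars.splitOnMax.go ['>'] (f + 1) 1 (c :: r) cur acc
              = PySem.Chars.splitOnMax.go ['>'] f 1 r (c :: cur) acc from by
            simp [PySem.Chars.splitOnMax.go, hpre]]
        rw [ht]
        simp [hc, List.takeWhile]

-- B computes the same filtered prefix
theorem pvAltEq (text : String) :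
    find_next_non_terminal_alt text
      = String.ofList ((text.toList.takeWhile (· ≠ '>')).filter (· ≠ '<')) := by
  obtain ⟨t, ht⟩ := pvSplitGo_one text.toList [] [] (text.length + 1) (by
    rw [String.length_toList]; omega)
  simp only [find_next_non_terminal_alt, PySem.Str.splitMax?, PySem.Chars.splitMax?,
    PySem.Chars.splitOnMax, show (">" : String).toList = ['>'] from rfl]
  norm_num
  rw [ht]
  simp only [List.reverse_nil, List.nil_append]
  apply String.ext
  rw [PySem.Str.toList_replace]
  simp only [String.toList_ofList]
  have : PySem.Chars.replace (List.takeWhile (fun x => x ≠ '>') text.toList) ['<'] [] =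
      (List.takeWhile (fun x => x ≠ '>') text.toList).filter (· ≠ '<') := by
    simp only [PySem.Chars.replace, List.isEmpty_cons, Bool.false_eq_true, if_false]
    exact (pvReplaceGo_eq _ [] _ (le_refl _)).trans (by simp)
  simpa using this

-- ===== VERDICT (by name: the statement is the Claim_ definition above) =====
theorem find_next_non_terminal_spec : Claim_equal_find_next_non_terminal := by
  intro text _
  show _ = _
  rw [pvAltEq, find_next_non_terminal, pvLoopA_eq]
  simp
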